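-- pv_equiv track=rewrite | github.com/vishfrnds/src | models/tokenizers_impl.py | _split_whitespaces_or_nonwhitespaces
-- ===== SOURCE A (Python) =====
-- from typing import (
--     AbstractSet,
--     Collection,
--     Dict,
--     Iterator,
--     List,
--     Literal,
--     Optional,
--     Union,
-- )
--
-- def _split_whitespaces_or_nonwhitespaces(
--     s: str, max_consecutive_slice_len: int
-- ) -> Iterator[str]:
--   """
--   Splits the string `s` so that each substring contains no more than `max_consecutive_slice_len`
--   consecutive whitespaces or consecutive non-whitespaces.
--   """
--   current_slice_len = 0
--   current_slice_is_space = s[0].isspace() if len(s) > 0 else False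
--   slice_start = 0
--
--   for i in range(len(s)):
--     is_now_space = s[i].isspace()
--
--     if current_slice_is_space ^ is_now_space:
--       current_slice_len = 1
--       current_slice_is_space = is_now_space
--     else:
--       current_slice_len += 1
--       if current_slice_len > max_consecutive_slice_len:
--         yield s[slice_start:i]
--         slice_start = i
--         current_slice_len = 1
--   yield s[slice_start:]
-- ===== SOURCE B (Python) =====
-- from itertools import groupby
--
-- def _split_whitespaces_or_nonwhitespaces(s, max_consecutive_slice_len):
--     # Collect cut positions: inside each maximal whitespace/non-whitespace run
--     # starting at p of length L, cut every max_consecutive_slice_len characters.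
--     cuts = []
--     p = 0
--     for _, grp in groupby(s, key=str.isspace):
--         length = sum(1 for _ in grp)
--         cuts.extend(range(p + max_consecutive_slice_len,
--                           p + length,
--                           max_consecutive_slice_len))
--         p += length
--     prev = 0
--     for c in cuts:
--         yield s[prev:c]
--         prev = c
--     yield s[prev:]
-- ===== Notes on version B (the rewrite author's own statement) =====
-- stated objective: alternative
-- what changed: Instead of A's stateful character scan that counts a running slice length and yields on overflow, B first computes the maximal whitespace/non-whitespace runs with itertools.groupby, derives all cut positions arithmetically (every max_consecutive_slice_len characters inside an over-long run, via range with step), and then slices the string once between consecutive cut positions.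
-- outside the precondition, e.g. on _split_whitespaces_or_nonwhitespaces('ab', 0): A returns ['', 'a', 'b'], B raises ValueError; on _split_whitespaces_or_nonwhitespaces('ab', -1): A returns ['', 'a', 'b'], B returns ['ab']
import Mathlib
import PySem

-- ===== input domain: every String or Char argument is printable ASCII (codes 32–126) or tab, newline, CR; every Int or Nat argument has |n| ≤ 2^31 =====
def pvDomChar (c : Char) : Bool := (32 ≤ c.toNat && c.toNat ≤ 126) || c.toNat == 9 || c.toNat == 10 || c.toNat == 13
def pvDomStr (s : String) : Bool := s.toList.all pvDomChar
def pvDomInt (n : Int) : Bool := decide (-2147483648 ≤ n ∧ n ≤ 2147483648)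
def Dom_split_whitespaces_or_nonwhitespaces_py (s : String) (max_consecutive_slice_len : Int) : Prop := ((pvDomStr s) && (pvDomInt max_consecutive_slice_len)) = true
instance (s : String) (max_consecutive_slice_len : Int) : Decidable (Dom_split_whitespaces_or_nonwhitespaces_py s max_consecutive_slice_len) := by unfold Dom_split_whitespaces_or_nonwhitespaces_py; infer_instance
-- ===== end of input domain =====

-- B replaces A's stateful running-length scan by computing run lengths (groupby), deriving all
-- cut positions arithmetically, and slicing between them; an alternative algorithm, same cost.


-- ===== PORT A =====
-- one iteration of A's for-loop; state = (current_slice_len, current_slice_is_space, slice_start, yielded)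
def pvStepA (m : Int) (s : String) (st : Int × Bool × Int × List String) (i : Int) :
    Int × Bool × Int × List String :=
  let now := PySem.Chars.isspace (PySem.List.pyGetD s.toList i ' ')
  if st.2.1 != now then (1, now, st.2.2.1, st.2.2.2)
  else if st.1 + 1 > m then (1, st.2.1, i, st.2.2.2 ++ [PySem.Str.slice s (some st.2.2.1) (some i)])
  else (st.1 + 1, st.2.1, st.2.2.1, st.2.2.2)

def split_whitespaces_or_nonwhitespaces_py (s : String) (max_consecutive_slice_len : Int) : List String :=
  let init_sp := if 0 < PySem.Str.len s
                 then PySem.Chars.isspace (PySem.List.pyGetD s.toList 0 ' ') else false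
  let r := (PySem.List.pyRange 0 (PySem.Str.len s) 1).foldl
             (pvStepA max_consecutive_slice_len s) (0, init_sp, 0, [])
  r.2.2.2 ++ [PySem.Str.slice s (some r.2.2.1) none]

-- ===== PORT B =====
-- lengths of the maximal runs of equal flags (itertools.groupby group lengths)
def pvGroupLens : List Bool → List Int
  | [] => []
  | b :: t => ((t.takeWhile (· == b)).length + 1 : Int) :: pvGroupLens (t.dropWhile (· == b))
termination_by l => l.length
decreasing_by
  have := List.length_dropWhile_le (fun x => x == b) t
  simp; omega

def split_whitespaces_or_nonwhitespaces_py_alt (s : String) (max_consecutive_slice_len : Int) : List String :=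
  let pc := (pvGroupLens (s.toList.map PySem.Chars.isspace)).foldl
    (fun (pc : Int × List Int) L =>
      (pc.1 + L, pc.2 ++ PySem.List.pyRange (pc.1 + max_consecutive_slice_len) (pc.1 + L) max_consecutive_slice_len))
    (0, [])
  let po := pc.2.foldl
    (fun (po : Int × List String) c => (c, po.2 ++ [PySem.Str.slice s (some po.1) (some c)])) (0, [])
  po.2 ++ [PySem.Str.slice s (some po.1) none]

-- ===== PRECONDITION & SPEC =====
-- Pre_ excludes max_consecutive_slice_len < 1: a non-positive slice bound is meaningless, A's output
-- there (a leading empty slice then single-character pieces) is an accident of its counter reset, and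
-- B raises ValueError (step 0) or yields the whole string (negative step gives an empty range).
def Pre_split_whitespaces_or_nonwhitespaces_py (s : String) (max_consecutive_slice_len : Int) : Prop :=
  1 ≤ max_consecutive_slice_len
instance (s : String) (max_consecutive_slice_len : Int) : Decidable (Pre_split_whitespaces_or_nonwhitespaces_py s max_consecutive_slice_len) := by unfold Pre_split_whitespaces_or_nonwhitespaces_py; infer_instance

def pvWitness_split_whitespaces_or_nonwhitespaces_py : String × Int := ("hello  world", 2)

def Spec_split_whitespaces_or_nonwhitespaces_py (s : String) (max_consecutive_slice_len : Int) (out : List String) : Prop := out = split_whitespaces_or_nonwhitespaces_py_alt s max_consecutive_slice_len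
instance (s : String) (max_consecutive_slice_len : Int) (out : List String) : Decidable (Spec_split_whitespaces_or_nonwhitespaces_py s max_consecutive_slice_len out) := by unfold Spec_split_whitespaces_or_nonwhitespaces_py; infer_instance

-- ===== CLAIM (what is proved, stated in full; the proofs are below) =====
def Claim_equal_split_whitespaces_or_nonwhitespaces_py : Prop := ∀ (s : String) (max_consecutive_slice_len : Int), Dom_split_whitespaces_or_nonwhitespaces_py s max_consecutive_slice_len → Pre_split_whitespaces_or_nonwhitespaces_py s max_consecutive_slice_len → Spec_split_whitespaces_or_nonwhitespaces_py s max_consecutive_slice_len (split_whitespaces_or_nonwhitespaces_py s max_consecutive_slice_len)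

-- ===== LEMMAS AND PROOFS =====

-- the cut positions A's scan produces, collected from the flag list (flag = isspace of the char)
def pvCutsAux (m : Int) : List Bool → Int → Int → Bool → List Int
  | [], _, _, _ => []
  | now :: t, i, len, sp =>
    if sp != now then pvCutsAux m t (i + 1) 1 now
    else if len + 1 > m then i :: pvCutsAux m t (i + 1) 1 sp
    else pvCutsAux m t (i + 1) (len + 1) sp

-- the cut positions B derives from the run lengths, starting at offset p
def pvCutsRuns (m : Int) : Int → List Int → List Int
  | _, [] => []
  | p, L :: ls => PySem.List.pyRange (p + m) (p + L) m ++ pvCutsRuns m (p + L) ls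

-- slices of s between consecutive cut positions, starting at `start`, plus the final tail slice
def pvSlices (s : String) : Int → List Int → List String
  | start, [] => [PySem.Str.slice s (some start) none]
  | start, c :: cs => PySem.Str.slice s (some start) (some c) :: pvSlices s c cs

theorem pvRange_pos_nil (a b m : Int) (hm : 0 < m) (h : b ≤ a) :
    PySem.List.pyRange a b m = [] := by
  rw [PySem.List.pyRange_of_pos a b hm]
  simp [show ¬ a < b by omega]

theorem pvRange_pos_cons (a b m : Int) (hm : 0 < m) (h : a < b) :
    PySem.List.pyRange a b m = a :: PySem.List.pyRange (a + m) b m := by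
  rw [PySem.List.pyRange_of_pos a b hm, PySem.List.pyRange_of_pos (a+m) b hm]
  have hm0 : m ≠ 0 := by omega
  by_cases h2 : a + m < b
  · have he : b - a + m - 1 = (b - (a+m) + m - 1) + 1*m := by ring
    have hdiv : (b - a + m - 1)/m = (b - (a+m) + m - 1)/m + 1 := by
      rw [he, Int.add_mul_ediv_right _ _ hm0]
    have hN' : 0 ≤ (b - (a+m) + m - 1)/m := Int.ediv_nonneg (by omega) (by omega)
    simp only [if_pos h, if_pos h2, hdiv]
    rw [show ((b - (a+m) + m - 1)/m + 1).toNat = ((b-(a+m)+m-1)/m).toNat + 1 from by omega]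
    rw [List.range_succ_eq_map]
    simp only [List.map_cons, List.map_map]
    congr 1
    · simp
    · apply List.map_congr_left
      intro k _
      simp only [Function.comp_apply]
      push_cast
      ring
  · have h1 : (b - a + m - 1)/m = 1 := by
      have := (PySem.Int.floordiv_eq_iff_of_pos (a := b - a + m - 1) (b := m) (q := 1) hm).2
        (by constructor <;> omega)
      rw [← PySem.Int.floordiv_eq_ediv_of_pos hm]
      exact this
    simp [if_pos h, if_neg h2, h1]

-- A's fold, started anywhere, produces the slices of its remaining cut positions
theorem pvFoldA (s : String) (m : Int) :
    ∀ (t pre : List Char) (len : Int) (sp : Bool) (start : Int) (acc : List String),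
      s.toList = pre ++ t →
      (((PySem.List.pyRange (pre.length : Int) ((s.toList.length : Nat) : Int) 1).foldl
          (pvStepA m s) (len, sp, start, acc)).2.2.2
        ++ [PySem.Str.slice s
              (some ((PySem.List.pyRange (pre.length : Int) ((s.toList.length : Nat) : Int) 1).foldl
                (pvStepA m s) (len, sp, start, acc)).2.2.1) none])
      = acc ++ pvSlices s start (pvCutsAux m (t.map PySem.Chars.isspace) (pre.length : Int) len sp) := by
  intro t
  induction t with
  | nil =>
    intro pre len sp start acc h
    rw [PySem.List.pyRange_one_eq_nil (by rw [h]; simp)]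
    simp [pvCutsAux, pvSlices]
  | cons c t ih =>
    intro pre len sp start acc h
    have hlen : ((pre.length : Nat) : Int) < ((s.toList.length : Nat) : Int) := by
      rw [h]; simp
    rw [PySem.List.pyRange_one_cons hlen, List.foldl_cons]
    have hnow : PySem.List.pyGetD s.toList ((pre.length : Nat) : Int) ' ' = c := by
      rw [h, PySem.List.pyGetD_natCast]
      simp [List.getD]
    have hidx : ((pre.length : Nat) : Int) + 1 = (((pre ++ [c]).length : Nat) : Int) := by
      simp
    have hsplit : s.toList = (pre ++ [c]) ++ t := by simpa using h
    simp only [pvStepA, hnow, List.map_cons, pvCutsAux]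
    by_cases hsp : sp != PySem.Chars.isspace c
    · simp only [hsp, if_true, hidx]
      rw [ih (pre ++ [c]) 1 (PySem.Chars.isspace c) start acc hsplit]
    · have hsp' : (sp != PySem.Chars.isspace c) = false := by simpa using hsp
      simp only [hsp', Bool.false_eq_true, if_false]
      by_cases hcut : len + 1 > m
      · simp only [if_pos hcut, hidx]
        rw [ih (pre ++ [c]) 1 sp ((pre.length : Nat) : Int)
            (acc ++ [PySem.Str.slice s (some start) (some ((pre.length : Nat) : Int))]) hsplit]
        simp [pvSlices, List.append_assoc]
      · simp only [if_neg hcut, hidx]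
        rw [ih (pre ++ [c]) (len + 1) sp start acc hsplit]

-- inside a run: A's remaining cuts are an arithmetic progression, then B's cuts of the later runs
theorem pvMain (m : Int) (hm : 1 ≤ m) :
    ∀ (t : List Bool) (i len : Int) (b : Bool), 1 ≤ len → len ≤ m →
      pvCutsAux m t i len b =
        PySem.List.pyRange (i + m - len) (i + ((t.takeWhile (· == b)).length : Int)) m
          ++ pvCutsRuns m (i + ((t.takeWhile (· == b)).length : Int))
               (pvGroupLens (t.dropWhile (· == b))) := by
  intro t
  induction t with
  | nil =>
    intro i len b h1 h2
    simp only [pvCutsAux, List.takeWhile_nil, List.dropWhile_nil, pvGroupLens, pvCutsRuns,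
      List.length_nil, Nat.cast_zero, add_zero, List.append_nil]
    rw [pvRange_pos_nil _ _ _ (by omega) (by omega)]
  | cons now t ih =>
    intro i len b h1 h2
    by_cases hb : now = b
    · subst hb
      simp only [List.takeWhile_cons, List.dropWhile_cons, beq_self_eq_true, if_true,
        List.length_cons, Nat.cast_add, Nat.cast_one]
      by_cases hlen : len + 1 > m
      · have hlm : len = m := by omega
        rw [show pvCutsAux m (now :: t) i len now = i :: pvCutsAux m t (i + 1) 1 now from by
          simp [pvCutsAux, hlen]]
        rw [ih (i+1) 1 now (by omega) (by omega)]
        rw [hlm]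
        generalize hR : ((List.takeWhile (fun x => x == now) t).length : Int) = R
        have hR0 : 0 ≤ R := by rw [← hR]; positivity
        rw [show i + m - m = i from by ring, show i + (R + 1) = i + 1 + R from by ring,
          show i + 1 + m - 1 = i + m from by ring]
        rw [pvRange_pos_cons i (i + 1 + R) m (by omega) (by omega)]
        simp
      · rw [show pvCutsAux m (now :: t) i len now = pvCutsAux m t (i + 1) (len + 1) now from by
          simp [pvCutsAux, hlen]]
        rw [ih (i+1) (len+1) now (by omega) (by omega)]
        generalize hR : ((List.takeWhile (fun x => x == now) t).length : Int) = R
        rw [show i + 1 + m - (len + 1) = i + m - len from by ring,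
          show i + (R + 1) = i + 1 + R from by ring]
    · have hbe : (now == b) = false := by simp [hb]
      have hbe2 : (b != now) = true := by simp [Ne.symm hb]
      simp only [List.takeWhile_cons, List.dropWhile_cons, hbe, Bool.false_eq_true, if_false,
        List.length_nil, Nat.cast_zero, add_zero]
      rw [show pvCutsAux m (now :: t) i len b = pvCutsAux m t (i + 1) 1 now from by
        simp only [pvCutsAux, hbe2, if_true]]
      rw [ih (i+1) 1 now (by omega) (by omega)]
      rw [pvRange_pos_nil (i + m - len) i m (by omega) (by omega)]
      rw [show pvGroupLens (now :: t) =
          ((t.takeWhile (· == now)).length + 1 : Int) :: pvGroupLens (t.dropWhile (· == now)) from by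
        rw [pvGroupLens]]
      rw [pvCutsRuns]
      generalize hR : ((List.takeWhile (fun x => x == now) t).length : Int) = R
      rw [show i + 1 + m - 1 = i + m from by ring, show i + (R + 1) = i + 1 + R from by ring]
      simp

-- B's first fold computes pvCutsRuns
theorem pvFoldCuts (m : Int) :
    ∀ (ls : List Int) (p : Int) (acc : List Int),
      (ls.foldl (fun (pc : Int × List Int) L =>
        (pc.1 + L, pc.2 ++ PySem.List.pyRange (pc.1 + m) (pc.1 + L) m)) (p, acc)).2
      = acc ++ pvCutsRuns m p ls := by
  intro ls
  induction ls with
  | nil => intro p acc; simp [pvCutsRuns]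
  | cons L ls ih => intro p acc; simp [pvCutsRuns, ih, List.append_assoc]

-- B's second fold computes pvSlices
theorem pvFoldSlices (s : String) :
    ∀ (cuts : List Int) (prev : Int) (acc : List String),
      ((cuts.foldl (fun (po : Int × List String) c =>
          (c, po.2 ++ [PySem.Str.slice s (some po.1) (some c)])) (prev, acc)).2
        ++ [PySem.Str.slice s
            (some (cuts.foldl (fun (po : Int × List String) c =>
              (c, po.2 ++ [PySem.Str.slice s (some po.1) (some c)])) (prev, acc)).1) none])
      = acc ++ pvSlices s prev cuts := by
  intro cuts
  induction cuts with
  | nil => intro prev acc; simp [pvSlices]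
  | cons c cs ih => intro prev acc; simp [pvSlices, ih, List.append_assoc]

-- the two cut lists agree when started at the beginning of the string
theorem pvCutsTop (m : Int) (hm : 1 ≤ m) (flags : List Bool) (sp0 : Bool)
    (hsp : ∀ f t, flags = f :: t → sp0 = f) :
    pvCutsAux m flags 0 0 sp0 = pvCutsRuns m 0 (pvGroupLens flags) := by
  cases flags with
  | nil => simp [pvCutsAux, pvGroupLens, pvCutsRuns]
  | cons f t =>
    have hf : sp0 = f := hsp f t rfl
    rw [hf]
    have hc : ¬((0 : Int) + 1 > m) := by omega
    rw [show pvCutsAux m (f :: t) 0 0 f = pvCutsAux m t 1 1 f from by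
      rw [pvCutsAux]
      rw [if_neg (by simp), if_neg hc]
      norm_num]
    rw [pvMain m hm t 1 1 f (le_refl 1) hm]
    rw [pvGroupLens, pvCutsRuns]
    generalize ((List.takeWhile (fun x => x == f) t).length : Int) = R
    rw [show (1 : Int) + m - 1 = 0 + m from by ring, show (1 : Int) + R = 0 + (R + 1) from by ring]

-- ===== VERDICT (by name: the statement is the Claim_ definition above) =====
theorem split_whitespaces_or_nonwhitespaces_py_spec : Claim_equal_split_whitespaces_or_nonwhitespaces_py := by
  intro s m _ hpre
  unfold Spec_split_whitespaces_or_nonwhitespaces_py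
  have hm : 1 ≤ m := hpre
  simp only [split_whitespaces_or_nonwhitespaces_py, split_whitespaces_or_nonwhitespaces_py_alt,
    PySem.Str.len_eq]
  rw [pvFoldCuts, pvFoldSlices]
  have hA := pvFoldA s m s.toList []
    (0 : Int)
    (if 0 < PySem.Str.len s then PySem.Chars.isspace (PySem.List.pyGetD s.toList 0 ' ') else false)
    (0 : Int) [] (by simp)
  simp only [List.length_nil, Nat.cast_zero, List.nil_append, PySem.Str.len_eq] at hA
  rw [hA]
  congr 1
  apply pvCutsTop m hm
  intro f t hft
  have hne : s.toList ≠ [] := by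
    intro h0; rw [h0] at hft; simp at hft
  have hlen : (0 : Int) < (s.toList.length : Int) := by
    cases h0 : s.toList with
    | nil => exact absurd h0 hne
    | cons a l => simp
  rw [if_pos hlen]
  cases h0 : s.toList with
  | nil => exact absurd h0 hne
  | cons a l =>
    rw [h0] at hft
    simp at hft
    rw [PySem.List.pyGetD_zero_cons]
    exact hft.1
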